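-- pv_equiv track=rewrite | github.com/llenny18/hydroatlantis | hydrosapp/views.py | evaluate_hydroponics_conditions
-- ===== SOURCE A (Python) =====
-- def evaluate_hydroponics_conditions(temp_c, humidity_percent, lux):
--     def temp_status(t):
--         if 24 <= t <= 30:
--             return 'Good'
--         elif 21 <= t < 24 or 30 < t <= 33:
--             return 'Stable'
--         else:
--             return 'Bad'
--
--     def humidity_status(h):
--         if 50 <= h <= 70:
--             return 'Good'
--         elif 40 <= h < 50 or 70 < h <= 80:
--             return 'Stable'
--         else:
--             return 'Bad'
--
--     def lux_status(l):
--         if 30000 <= l <= 50000: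
--             return 'Good'
--         elif 25000 <= l < 30000 or 50000 < l <= 80000:
--             return 'Stable'
--         else:
--             return 'Bad'
--
--     statuses = [temp_status(temp_c), humidity_status(humidity_percent), lux_status(lux)]
--
--     if all(s == 'Good' for s in statuses):
--         return 'Good'
--     elif 'Bad' in statuses:
--         return 'Bad'
--     else:
--         return 'Stable'
-- ===== SOURCE B (Python) =====
-- def evaluate_hydroponics_conditions(temp_c, humidity_percent, lux):
--     # Nested-interval staged checks: no per-sensor labels, no aggregation pass.
--     def within(v, lo, hi):
--         return lo <= v <= hi
--
--     if within(temp_c, 24, 30) and within(humidity_percent, 50, 70) and within(lux, 30000, 50000):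
--         return 'Good'
--     if within(temp_c, 21, 33) and within(humidity_percent, 40, 80) and within(lux, 25000, 80000):
--         return 'Stable'
--     return 'Bad'
-- ===== Notes on version B (the rewrite author's own statement) =====
-- stated objective: simpler
-- what changed: Replaced A's per-sensor three-way classification plus all/'Bad'-in label aggregation by two staged global boolean checks against nested intervals (all in narrow good ranges -> Good, all in wide stable ranges -> Stable, else Bad); no per-sensor labels or worst-tier reduction exist in B.
import Mathlib
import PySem

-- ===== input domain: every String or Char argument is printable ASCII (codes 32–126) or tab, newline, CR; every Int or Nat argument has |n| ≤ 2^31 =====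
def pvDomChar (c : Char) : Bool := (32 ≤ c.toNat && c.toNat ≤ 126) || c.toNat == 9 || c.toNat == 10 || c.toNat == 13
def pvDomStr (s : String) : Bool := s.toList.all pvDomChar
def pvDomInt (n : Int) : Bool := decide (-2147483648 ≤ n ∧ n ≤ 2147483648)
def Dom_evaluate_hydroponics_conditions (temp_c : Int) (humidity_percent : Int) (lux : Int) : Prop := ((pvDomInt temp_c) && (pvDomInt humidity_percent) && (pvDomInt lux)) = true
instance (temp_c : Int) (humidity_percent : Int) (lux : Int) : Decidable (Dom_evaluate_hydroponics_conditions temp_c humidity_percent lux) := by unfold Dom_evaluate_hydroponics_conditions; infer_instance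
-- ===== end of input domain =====

-- B replaces A's per-sensor three-way labels and all/'Bad'-in aggregation by two staged
-- global boolean checks against nested intervals (objective: simpler).

-- ===== PORT A =====
def pvA_temp_status (t : Int) : String :=
  if 24 ≤ t ∧ t ≤ 30 then "Good"
  else if (21 ≤ t ∧ t < 24) ∨ (30 < t ∧ t ≤ 33) then "Stable"
  else "Bad"

def pvA_humidity_status (h : Int) : String :=
  if 50 ≤ h ∧ h ≤ 70 then "Good"
  else if (40 ≤ h ∧ h < 50) ∨ (70 < h ∧ h ≤ 80) then "Stable"
  else "Bad"

def pvA_lux_status (l : Int) : String :=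
  if 30000 ≤ l ∧ l ≤ 50000 then "Good"
  else if (25000 ≤ l ∧ l < 30000) ∨ (50000 < l ∧ l ≤ 80000) then "Stable"
  else "Bad"

def evaluate_hydroponics_conditions (temp_c : Int) (humidity_percent : Int) (lux : Int) : String :=
  let statuses : List String :=
    [pvA_temp_status temp_c, pvA_humidity_status humidity_percent, pvA_lux_status lux]
  if statuses.all (fun s => s == "Good") then "Good"
  else if statuses.contains "Bad" then "Bad"
  else "Stable"

-- ===== PORT B =====
def pvB_within (v lo hi : Int) : Bool := lo ≤ v && v ≤ hi

def evaluate_hydroponics_conditions_alt (temp_c : Int) (humidity_percent : Int) (lux : Int) : String :=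
  if pvB_within temp_c 24 30 && pvB_within humidity_percent 50 70 && pvB_within lux 30000 50000 then
    "Good"
  else if pvB_within temp_c 21 33 && pvB_within humidity_percent 40 80 && pvB_within lux 25000 80000 then
    "Stable"
  else "Bad"

-- ===== PRECONDITION & SPEC =====
def Spec_evaluate_hydroponics_conditions (temp_c : Int) (humidity_percent : Int) (lux : Int) (out : String) : Prop := out = evaluate_hydroponics_conditions_alt temp_c humidity_percent lux
instance (temp_c : Int) (humidity_percent : Int) (lux : Int) (out : String) : Decidable (Spec_evaluate_hydroponics_conditions temp_c humidity_percent lux out) := by unfold Spec_evaluate_hydroponics_conditions; infer_instance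

-- ===== CLAIM (what is proved, stated in full; the proofs are below) =====
def Claim_equal_evaluate_hydroponics_conditions : Prop := ∀ (temp_c : Int) (humidity_percent : Int) (lux : Int), Dom_evaluate_hydroponics_conditions temp_c humidity_percent lux → Spec_evaluate_hydroponics_conditions temp_c humidity_percent lux (evaluate_hydroponics_conditions temp_c humidity_percent lux)

-- ===== LEMMAS AND PROOFS =====
set_option maxHeartbeats 1000000

theorem pv_status_cases (t h l : Int) :
    evaluate_hydroponics_conditions t h l =
      (if (24 ≤ t ∧ t ≤ 30) ∧ (50 ≤ h ∧ h ≤ 70) ∧ (30000 ≤ l ∧ l ≤ 50000) then "Good"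
       else if (21 ≤ t ∧ t ≤ 33) ∧ (40 ≤ h ∧ h ≤ 80) ∧ (25000 ≤ l ∧ l ≤ 80000) then "Stable"
       else "Bad") := by
  unfold evaluate_hydroponics_conditions pvA_temp_status pvA_humidity_status pvA_lux_status
  simp only [List.all_cons, List.all_nil, List.contains_eq_mem, List.mem_cons, List.not_mem_nil]
  split_ifs <;> first | rfl | omega | simp_all

theorem pv_alt_cases (t h l : Int) :
    evaluate_hydroponics_conditions_alt t h l =
      (if (24 ≤ t ∧ t ≤ 30) ∧ (50 ≤ h ∧ h ≤ 70) ∧ (30000 ≤ l ∧ l ≤ 50000) then "Good"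
       else if (21 ≤ t ∧ t ≤ 33) ∧ (40 ≤ h ∧ h ≤ 80) ∧ (25000 ≤ l ∧ l ≤ 80000) then "Stable"
       else "Bad") := by
  unfold evaluate_hydroponics_conditions_alt pvB_within
  simp only [Bool.and_eq_true, decide_eq_true_eq]
  split_ifs <;> first | rfl | omega | simp_all

-- ===== VERDICT (by name: the statement is the Claim_ definition above) =====
theorem evaluate_hydroponics_conditions_spec : Claim_equal_evaluate_hydroponics_conditions := by
  intro t h l _
  unfold Spec_evaluate_hydroponics_conditions
  rw [pv_status_cases, pv_alt_cases]
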